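-- pv_equiv track=rewrite | github.com/alexdunn/aalgopy | aalgo/arithmetic.py | multiplication_game
-- ===== SOURCE A (Python) =====
-- def multiplication_game(goal):
--     """With perfect play, return whether player 1 or player 2 would win in a game where the first player chooses a number 2-9 inclusive and multiplies with a number chosen by the second player going back and forth until the winner is the first player to reach a result greater or equal to the given integer `goal`.
--
--     This is UVa Programming Challenges Online Judge 847.  This is from chapter 2 of The Algorithm Design Manual.
--     """
--     # Player 1 must win for value 1
--     if goal == 1:
--         return True
--
--     # Assume that player 1 must win under optimal play.  This means player 1 should always choose 9 (make it take as few plays as possible) and player 2 should always choose 2 (make it take as many plays as possible).  If player 1 wins under this assumption, there is nothing player 2 can do to prevent this win because player 2 is already choosing the lowest numbers possible.  Under this assumption, any solution where player 2 wins is the optimal solution only if it has length less than the first solution where player 1 wins.  If it's the same length or shorter, player 1 could simply make some choices less than 9 to deny player 2 her/his win.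
--     current_value = 1
--     first_players_turn = True  # True for player 1 and False for player 2
--     while current_value < goal:
--         if first_players_turn:
--             current_value *= 9
--             first_players_turn = False
--         else:
--             current_value *= 2
--             first_players_turn = True
--
--     # If the assumption that player 1 must win finds player 2 winning first, then player 2 is going to win under optimal play.
--     if first_players_turn:  # player 2 winning will set player 1 as the current player
--         return False
--     else:
--         return True
-- ===== SOURCE B (Python) =====
-- def multiplication_game(goal):
--     """Winner of the alternating multiplication game toward `goal`: True iff
--     player 1 wins under optimal play.  Works top-down: instead of growing a
--     product from 1, shrink `goal` itself by ceiling division (by 9 for player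
--     1's best move, by 2 for player 2's), and the player whose division brings
--     it to 1 or below is the winner."""
--     def rounds(g):
--         g = -(-g // 9)
--         if g <= 1:
--             return True
--         g = -(-g // 2)
--         if g <= 1:
--             return False
--         return rounds(g)
--     return goal == 1 if goal <= 1 else rounds(goal)
-- ===== Notes on version B (the rewrite author's own statement) =====
-- stated objective: alternative
-- what changed: B works top-down: it recursively shrinks the goal itself by ceiling division (by 9 for player 1's move, by 2 for player 2's) and returns as soon as a division brings it to 1 or below, instead of A's bottom-up loop that multiplies a running value by alternating factors with a turn flag and a final parity test.
import Mathlib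
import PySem

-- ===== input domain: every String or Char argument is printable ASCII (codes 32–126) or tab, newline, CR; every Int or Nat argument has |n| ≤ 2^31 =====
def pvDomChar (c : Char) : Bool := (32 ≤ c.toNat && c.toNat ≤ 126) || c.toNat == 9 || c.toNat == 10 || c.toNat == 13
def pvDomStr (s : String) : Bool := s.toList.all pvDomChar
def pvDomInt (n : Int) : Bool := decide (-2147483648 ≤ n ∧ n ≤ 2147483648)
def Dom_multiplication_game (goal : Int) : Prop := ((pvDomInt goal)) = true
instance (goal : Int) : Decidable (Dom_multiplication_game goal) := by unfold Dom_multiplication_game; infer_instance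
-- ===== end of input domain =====

-- B replaces A's bottom-up multiply-and-alternate loop by a top-down recursion
-- that shrinks the goal itself with ceiling divisions (÷9 then ÷2); same values.

-- ===== PORT A =====
-- A's while loop: state = (current_value, first_players_turn); carries 1 ≤ v for termination.
def mgLoop (goal v : Int) (turn : Bool) (hv : 1 ≤ v) : Bool :=
  if h : v < goal then
    if turn then mgLoop goal (v * 9) false (by nlinarith)
    else mgLoop goal (v * 2) true (by nlinarith)
  else turn
termination_by (goal - v).toNat
decreasing_by
  · have : v + 1 ≤ v * 9 := by nlinarith
    omega
  · have : v + 1 ≤ v * 2 := by nlinarith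
    omega

def multiplication_game (goal : Int) : Bool :=
  if goal == 1 then true
  else !(mgLoop goal 1 true (by norm_num))

-- ===== PORT B =====
-- ceiling division: Python's -(-a // b)
def pvCeilDiv (a b : Int) : Int := -(PySem.Int.floordiv (-a) b)

-- B's recursion `rounds`: shrink g by ceil-div 9, then ceil-div 2; carries 2 ≤ g for termination.
def mgRounds (g : Int) (_hg : 2 ≤ g) : Bool :=
  let g1 := pvCeilDiv g 9
  if g1 ≤ 1 then true
  else
    let g2 := pvCeilDiv g1 2
    if h2 : g2 ≤ 1 then false
    else mgRounds g2 (by omega)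
termination_by g.toNat
decreasing_by
  have b1 := (PySem.Int.neg_floordiv_neg_eq_iff_of_pos (a := g) (b := 9) (q := pvCeilDiv g 9) (by norm_num)).mp rfl
  have b2 := (PySem.Int.neg_floordiv_neg_eq_iff_of_pos (a := pvCeilDiv g 9) (b := 2) (q := pvCeilDiv (pvCeilDiv g 9) 2) (by norm_num)).mp rfl
  simp only [pvCeilDiv] at *
  omega

def multiplication_game_alt (goal : Int) : Bool :=
  if h : goal ≤ 1 then goal == 1 else mgRounds goal (by omega)

-- ===== PRECONDITION & SPEC =====
def Spec_multiplication_game (goal : Int) (out : Bool) : Prop := out = multiplication_game_alt goal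
instance (goal : Int) (out : Bool) : Decidable (Spec_multiplication_game goal out) := by unfold Spec_multiplication_game; infer_instance

-- ===== CLAIM (what is proved, stated in full; the proofs are below) =====
def Claim_equal_multiplication_game : Prop := ∀ (goal : Int), Dom_multiplication_game goal → Spec_multiplication_game goal (multiplication_game goal)

-- ===== LEMMAS AND PROOFS =====

-- the defining bracket of ceiling division
theorem pvCeilDiv_bounds (a b : Int) (hb : 0 < b) :
    (pvCeilDiv a b - 1) * b < a ∧ a ≤ pvCeilDiv a b * b :=
  (PySem.Int.neg_floordiv_neg_eq_iff_of_pos (a := a) (b := b) (q := pvCeilDiv a b) hb).mp rfl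

theorem pvCeilDiv_eq (a b q : Int) (hb : 0 < b) (h1 : (q - 1) * b < a) (h2 : a ≤ q * b) :
    pvCeilDiv a b = q :=
  (PySem.Int.neg_floordiv_neg_eq_iff_of_pos (a := a) (b := b) (q := q) hb).mpr ⟨h1, h2⟩

-- proofs of `1 ≤ v` are irrelevant to the loop's value
theorem mgLoop_congr (goal v1 v2 : Int) (t : Bool) (h1 : 1 ≤ v1) (h2 : 1 ≤ v2)
    (e : v1 = v2) : mgLoop goal v1 t h1 = mgLoop goal v2 t h2 := by
  subst e; rfl

-- likewise for mgRounds
theorem mgRounds_congr (g1 g2 : Int) (h1 : 2 ≤ g1) (h2 : 2 ≤ g2) (e : g1 = g2) :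
    mgRounds g1 h1 = mgRounds g2 h2 := by
  subst e; rfl

-- one-step characterizations of mgRounds
theorem mgRounds_true (g : Int) (hg : 2 ≤ g) (h : pvCeilDiv g 9 ≤ 1) :
    mgRounds g hg = true := by
  rw [mgRounds]; simp [h]

theorem mgRounds_false (g : Int) (hg : 2 ≤ g) (h1 : ¬ pvCeilDiv g 9 ≤ 1)
    (h2 : pvCeilDiv (pvCeilDiv g 9) 2 ≤ 1) : mgRounds g hg = false := by
  rw [mgRounds]; simp [h1, h2]

theorem mgRounds_step (g : Int) (hg : 2 ≤ g) (h1 : ¬ pvCeilDiv g 9 ≤ 1)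
    (h2 : ¬ pvCeilDiv (pvCeilDiv g 9) 2 ≤ 1)
    (hg2 : 2 ≤ pvCeilDiv (pvCeilDiv g 9) 2) :
    mgRounds g hg = mgRounds (pvCeilDiv (pvCeilDiv g 9) 2) hg2 := by
  rw [mgRounds]; simp [h1, h2]

-- Core invariant: A's loop (negated) on state p equals B's recursion on ceil(goal/p).
theorem mgLoop_eq_rounds (goal p : Int) (hp : 1 ≤ p) (hlt : p < goal)
    (hc : 2 ≤ pvCeilDiv goal p) :
    (!(mgLoop goal p true hp)) = mgRounds (pvCeilDiv goal p) hc := by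
  obtain ⟨hcb1, hcb2⟩ := pvCeilDiv_bounds goal p (by omega)
  obtain ⟨h1b1, h1b2⟩ := pvCeilDiv_bounds (pvCeilDiv goal p) 9 (by norm_num)
  obtain ⟨h2b1, h2b2⟩ := pvCeilDiv_bounds (pvCeilDiv (pvCeilDiv goal p) 9) 2 (by norm_num)
  by_cases hA : pvCeilDiv (pvCeilDiv goal p) 9 ≤ 1
  · -- goal ≤ 9p : player 1 finishes
    have hgle : goal ≤ 9 * p := by nlinarith
    rw [mgRounds_true _ _ hA, mgLoop]
    simp only [hlt, dif_pos, if_true]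
    rw [mgLoop]
    have : ¬ p * 9 < goal := by omega
    simp [this]
  · have hg19 : goal > 9 * p := by nlinarith
    by_cases hB : pvCeilDiv (pvCeilDiv (pvCeilDiv goal p) 9) 2 ≤ 1
    · -- 9p < goal ≤ 18p : player 2 finishes
      have hgle : goal ≤ 18 * p := by nlinarith
      rw [mgRounds_false _ _ hA hB, mgLoop]
      simp only [hlt, dif_pos, if_true]
      rw [mgLoop]
      have h9 : p * 9 < goal := by omega
      simp only [h9, dif_pos, Bool.false_eq_true, if_false]
      rw [mgLoop]
      have : ¬ p * 9 * 2 < goal := by omega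
      simp [this]
    · -- goal > 18p : one full round on each side, recurse
      have hgt : goal > 18 * p := by nlinarith
      rw [mgRounds_step _ _ hA hB (by omega), mgLoop]
      simp only [hlt, dif_pos, if_true]
      rw [mgLoop]
      have h9 : p * 9 < goal := by omega
      simp only [h9, dif_pos, Bool.false_eq_true, if_false]
      rw [mgLoop_congr goal (p * 9 * 2) (18 * p) true (by nlinarith) (by nlinarith) (by ring)]
      have hrepr : pvCeilDiv goal (18 * p) = pvCeilDiv (pvCeilDiv (pvCeilDiv goal p) 9) 2 := by
        apply pvCeilDiv_eq _ _ _ (by nlinarith) (by nlinarith) (by nlinarith)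
      rw [mgLoop_eq_rounds goal (18 * p) (by nlinarith) (by omega) (by omega)]
      exact mgRounds_congr _ _ _ (by omega) hrepr
termination_by (goal - p).toNat
decreasing_by
  have : p + 1 ≤ 18 * p := by nlinarith
  omega

-- ===== VERDICT (by name: the statement is the Claim_ definition above) =====
theorem multiplication_game_spec : Claim_equal_multiplication_game := by
  intro goal _
  unfold Spec_multiplication_game multiplication_game multiplication_game_alt
  by_cases h1 : goal = 1
  · simp [h1]
  · simp only [beq_iff_eq, h1, if_false]
    by_cases h2 : goal ≤ 1
    · -- goal ≤ 0: A's loop exits at once with turn = true, so A returns false; B returns (goal == 1) = false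
      have hng : ¬ (1 : Int) < goal := by omega
      rw [mgLoop]
      simp [hng, h2, h1]
    · have hlt : (1 : Int) < goal := by omega
      rw [dif_neg h2]
      have hc1 : pvCeilDiv goal 1 = goal := pvCeilDiv_eq _ _ _ (by norm_num) (by omega) (by omega)
      rw [mgLoop_congr goal 1 1 true _ (by norm_num) rfl,
          mgLoop_eq_rounds goal 1 (by norm_num) hlt (by omega)]
      exact mgRounds_congr _ _ (by omega) (by omega) hc1
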